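-- pv_equiv track=rewrite | github.com/todorovventsi/Software-Engineering | Programming-Fundamentals-with-Python/functions-exercises/06. Password Validator.py | check_forbidden_symbols
-- ===== SOURCE A (Python) =====
-- def check_forbidden_symbols(password):
--     # The password must contain only letters and digits.
--     # Returns True if the password is valid and false if it is not
--     is_valid = True
--     for char in password:
--         if not (48 <= ord(char) <= 57 or 65 <= ord(char) <= 90 or 97 <= ord(char) <= 122):
--             is_valid = False
--             break
--     if is_valid:
--         return True
--     return False
-- ===== SOURCE B (Python) =====
-- _ALLOWED = "0123456789ABCDEFGHIJKLMNOPQRSTUVWXYZabcdefghijklmnopqrstuvwxyz"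
-- _DELETE_ALLOWED = str.maketrans("", "", _ALLOWED)
--
-- def check_forbidden_symbols(password):
--     # Delete every allowed character; the password is valid iff nothing remains.
--     return password.translate(_DELETE_ALLOWED) == ""
-- ===== Notes on version B (the rewrite author's own statement) =====
-- stated objective: idiomatic
-- what changed: Inverts the computation: instead of scanning for a forbidden character with a flag and early break, B deletes every allowed character with a precomputed str.translate deletion table and tests that the residue string is empty.
import Mathlib
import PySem

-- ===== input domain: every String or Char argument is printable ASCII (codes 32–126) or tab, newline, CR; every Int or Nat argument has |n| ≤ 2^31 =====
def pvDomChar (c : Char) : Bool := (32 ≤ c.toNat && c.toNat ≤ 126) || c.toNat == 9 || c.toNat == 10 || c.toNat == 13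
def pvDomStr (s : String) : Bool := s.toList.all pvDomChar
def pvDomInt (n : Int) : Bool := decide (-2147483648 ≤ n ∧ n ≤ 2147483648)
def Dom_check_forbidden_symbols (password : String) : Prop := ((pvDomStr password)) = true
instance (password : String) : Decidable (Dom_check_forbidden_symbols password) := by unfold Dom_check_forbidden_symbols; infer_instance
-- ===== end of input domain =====

-- B inverts A's flagged early-break scan: it deletes every allowed character via a precomputed translate deletion table and tests that the residue is empty (objective: idiomatic); same return value on every input.


-- ===== PORT A =====
-- A's loop: scan characters in order, clear the flag and break on the first forbidden one.
def pvLoopA : List Char → Bool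
  | [] => true
  | c :: rest =>
    if !(48 ≤ c.toNat && c.toNat ≤ 57 || 65 ≤ c.toNat && c.toNat ≤ 90 || 97 ≤ c.toNat && c.toNat ≤ 122) then
      false
    else
      pvLoopA rest

def check_forbidden_symbols (password : String) : Bool :=
  let is_valid := pvLoopA password.toList
  if is_valid then true else false

-- ===== PORT B =====
def pvAllowedChars : List Char :=
  "0123456789ABCDEFGHIJKLMNOPQRSTUVWXYZabcdefghijklmnopqrstuvwxyz".toList

-- password.translate(deletion table of pvAllowedChars): keep exactly the characters NOT in the table (exact for a pure deletion table).
def check_forbidden_symbols_alt (password : String) : Bool :=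
  (password.toList.filter (fun c => !(pvAllowedChars.contains c))) == []

-- ===== PRECONDITION & SPEC =====
def Spec_check_forbidden_symbols (password : String) (out : Bool) : Prop := out = check_forbidden_symbols_alt password
instance (password : String) (out : Bool) : Decidable (Spec_check_forbidden_symbols password out) := by unfold Spec_check_forbidden_symbols; infer_instance

-- ===== CLAIM (what is proved, stated in full; the proofs are below) =====
def Claim_equal_check_forbidden_symbols : Prop := ∀ (password : String), Dom_check_forbidden_symbols password → Spec_check_forbidden_symbols password (check_forbidden_symbols password)

-- ===== LEMMAS AND PROOFS =====
def pvAllowedB (c : Char) : Bool := 48 ≤ c.toNat && c.toNat ≤ 57 || 65 ≤ c.toNat && c.toNat ≤ 90 || 97 ≤ c.toNat && c.toNat ≤ 122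

theorem pvContains_allowed (c : Char) : pvAllowedChars.contains c = pvAllowedB c := by
  rw [Bool.eq_iff_iff, List.contains_iff_mem]
  show c ∈ pvAllowedChars ↔ _
  have hAllowed : pvAllowedChars = ['0', '1', '2', '3', '4', '5', '6', '7', '8', '9', 'A', 'B', 'C', 'D', 'E', 'F', 'G', 'H', 'I', 'J', 'K', 'L', 'M', 'N', 'O', 'P', 'Q', 'R', 'S', 'T', 'U', 'V', 'W', 'X', 'Y', 'Z', 'a', 'b', 'c', 'd', 'e', 'f', 'g', 'h', 'i', 'j', 'k', 'l', 'm', 'n', 'o', 'p', 'q', 'r', 's', 't', 'u', 'v', 'w', 'x', 'y', 'z'] := by decide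
  rw [hAllowed]
  constructor
  · intro h
    have h2 : c.toNat ∈ (['0', '1', '2', '3', '4', '5', '6', '7', '8', '9', 'A', 'B', 'C', 'D', 'E', 'F', 'G', 'H', 'I', 'J', 'K', 'L', 'M', 'N', 'O', 'P', 'Q', 'R', 'S', 'T', 'U', 'V', 'W', 'X', 'Y', 'Z', 'a', 'b', 'c', 'd', 'e', 'f', 'g', 'h', 'i', 'j', 'k', 'l', 'm', 'n', 'o', 'p', 'q', 'r', 's', 't', 'u', 'v', 'w', 'x', 'y', 'z']).map Char.toNat := List.mem_map.mpr ⟨c, h, rfl⟩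
    have hmap : (['0', '1', '2', '3', '4', '5', '6', '7', '8', '9', 'A', 'B', 'C', 'D', 'E', 'F', 'G', 'H', 'I', 'J', 'K', 'L', 'M', 'N', 'O', 'P', 'Q', 'R', 'S', 'T', 'U', 'V', 'W', 'X', 'Y', 'Z', 'a', 'b', 'c', 'd', 'e', 'f', 'g', 'h', 'i', 'j', 'k', 'l', 'm', 'n', 'o', 'p', 'q', 'r', 's', 't', 'u', 'v', 'w', 'x', 'y', 'z']).map Char.toNat = [48, 49, 50, 51, 52, 53, 54, 55, 56, 57, 65, 66, 67, 68, 69, 70, 71, 72, 73, 74, 75, 76, 77, 78, 79, 80, 81, 82, 83, 84, 85, 86, 87, 88, 89, 90, 97, 98, 99, 100, 101, 102, 103, 104, 105, 106, 107, 108, 109, 110, 111, 112, 113, 114, 115, 116, 117, 118, 119, 120, 121, 122] := by decide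
    rw [hmap] at h2
    simp only [List.mem_cons, List.not_mem_nil, or_false] at h2
    simp only [pvAllowedB, Bool.or_eq_true, Bool.and_eq_true, decide_eq_true_eq]
    omega
  · intro hb
    simp only [pvAllowedB, Bool.or_eq_true, Bool.and_eq_true, decide_eq_true_eq] at hb
    have h1 : 48 ≤ c.toNat := by omega
    have h2 : c.toNat ≤ 122 := by omega
    have hc : c = Char.ofNat c.toNat := (Char.ofNat_toNat c).symm
    rw [hc]
    obtain ⟨n, hn⟩ : ∃ n, c.toNat = n := ⟨_, rfl⟩
    rw [hn] at h1 h2 hb ⊢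
    interval_cases n <;> first | decide | omega

theorem pvLoopA_eq_filter (cs : List Char) :
    pvLoopA cs = ((cs.filter (fun c => !(pvAllowedChars.contains c))) == []) := by
  induction cs with
  | nil => rfl
  | cons c rest ih =>
    show (if !pvAllowedB c then false else pvLoopA rest) = _
    rw [List.filter_cons, pvContains_allowed]
    cases h : pvAllowedB c <;> simp [ih]

-- ===== VERDICT (by name: the statement is the Claim_ definition above) =====
theorem check_forbidden_symbols_spec : Claim_equal_check_forbidden_symbols := by
  intro password _hdom
  unfold Spec_check_forbidden_symbols check_forbidden_symbols check_forbidden_symbols_alt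
  rw [pvLoopA_eq_filter]
  cases h : (password.toList.filter (fun c => !(pvAllowedChars.contains c))) == [] <;> simp
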